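-- pv_equiv track=rewrite | github.com/AustinParah/AP-CS-Prin_VARK | vowel-obliterator.py | eraseVowels
-- ===== SOURCE A (Python) =====
-- def eraseVowels(input):
--     current = ""
--     for letter in input:
--         if(letter == 'x'):
--             break
--
--         if(letter != 'a' and letter != 'i' and letter != 'e' and letter != 'o' and letter != 'u'):
--             current += letter
--
--     return current
-- ===== SOURCE B (Python) =====
-- def eraseVowels(input):
--     end = input.find('x')
--     s = input if end == -1 else input[:end]
--     for v in 'aeiou':
--         s = s.replace(v, '')
--     return s
-- ===== Notes on version B (the rewrite author's own statement) =====
-- stated objective: faster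
-- what changed: A's per-character loop with an inline break and chained inequality tests is replaced by whole-string operations: str.find locates the break character, a slice takes the prefix, and five chained str.replace passes delete the vowels, so B has no per-character Python loop and runs in C-level primitives.
import Mathlib
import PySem

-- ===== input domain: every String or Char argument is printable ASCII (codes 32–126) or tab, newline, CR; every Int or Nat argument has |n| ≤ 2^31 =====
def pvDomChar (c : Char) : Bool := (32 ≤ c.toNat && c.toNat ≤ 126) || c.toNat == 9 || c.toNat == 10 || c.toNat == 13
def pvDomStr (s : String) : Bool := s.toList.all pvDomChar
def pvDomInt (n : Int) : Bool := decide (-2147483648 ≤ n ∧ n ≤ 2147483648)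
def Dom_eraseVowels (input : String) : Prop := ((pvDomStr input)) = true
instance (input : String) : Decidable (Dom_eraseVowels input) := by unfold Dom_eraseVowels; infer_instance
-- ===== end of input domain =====

-- B replaces A's character loop with whole-string operations: find the first 'x', slice the prefix, then delete vowels by five chained replace passes; objective: faster (C-level string primitives instead of a per-character Python loop, measured).

-- ===== PORT A =====
-- the for-loop with break, accumulating `current`, as structural recursion over the characters
def eraseVowelsLoop (current : String) : List Char → String
  | [] => current
  | letter :: rest =>
    if letter = 'x' then current
    else if letter ≠ 'a' ∧ letter ≠ 'i' ∧ letter ≠ 'e' ∧ letter ≠ 'o' ∧ letter ≠ 'u' then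
      eraseVowelsLoop (current.push letter) rest
    else
      eraseVowelsLoop current rest

def eraseVowels (input : String) : String := eraseVowelsLoop "" input.toList

-- ===== PORT B =====
def eraseVowels_alt (input : String) : String :=
  let e := PySem.Str.find input "x"                                        -- end = input.find('x')
  let s := if e = -1 then input else PySem.Str.slice input none (some e)   -- s = input if end == -1 else input[:end]
  "aeiou".toList.foldl (fun s v => PySem.Str.replace s (String.ofList [v]) "") s   -- for v in 'aeiou': s = s.replace(v, '')

-- ===== PRECONDITION & SPEC =====
def Spec_eraseVowels (input : String) (out : String) : Prop := out = eraseVowels_alt input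
instance (input : String) (out : String) : Decidable (Spec_eraseVowels input out) := by unfold Spec_eraseVowels; infer_instance

-- ===== CLAIM (what is proved, stated in full; the proofs are below) =====
def Claim_equal_eraseVowels : Prop := ∀ (input : String), Dom_eraseVowels input → Spec_eraseVowels input (eraseVowels input)

-- ===== LEMMAS AND PROOFS =====

-- A's loop builds the accumulator, then equals: vowel-filter of the prefix before the first 'x'
theorem eraseVowelsLoop_eq (l : List Char) : ∀ (cur : String),
    eraseVowelsLoop cur l =
      cur ++ String.ofList ((l.takeWhile (fun c => c ≠ 'x')).filter
        (fun c => ¬ (c ∈ ['a', 'e', 'i', 'o', 'u']))) := by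
  induction l with
  | nil => intro cur; simp [eraseVowelsLoop]
  | cons c rest ih =>
    intro cur
    by_cases hx : c = 'x'
    · subst hx; simp [eraseVowelsLoop]
    · by_cases hv : c = 'a' ∨ c = 'e' ∨ c = 'i' ∨ c = 'o' ∨ c = 'u'
      · have hk : ¬ (c ≠ 'a' ∧ c ≠ 'i' ∧ c ≠ 'e' ∧ c ≠ 'o' ∧ c ≠ 'u') := by tauto
        simp only [eraseVowelsLoop, hx, if_false, hk]
        rw [ih]
        rcases hv with h | h | h | h | h <;> simp [List.takeWhile, h]
      · push Not at hv
        obtain ⟨ha, he, hi, ho, hu⟩ := hv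
        have hk : (c ≠ 'a' ∧ c ≠ 'i' ∧ c ≠ 'e' ∧ c ≠ 'o' ∧ c ≠ 'u') := ⟨ha, hi, he, ho, hu⟩
        simp only [eraseVowelsLoop, hx, if_false]
        rw [if_pos hk, ih]
        apply String.ext
        simp [List.takeWhile, ha, he, hi, ho, hu, hx]

-- replace with a one-character pattern and empty replacement is a filter
theorem replace_go_single (v : Char) : ∀ (l : List Char) (fuel : Nat) (acc : List Char),
    l.length ≤ fuel →
    PySem.Chars.replace.go [v] [] fuel l acc = acc.reverse ++ l.filter (fun c => c ≠ v) := by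
  intro l
  induction l with
  | nil => intro fuel acc _; cases fuel <;> simp [PySem.Chars.replace.go]
  | cons c t ih =>
    intro fuel acc hf
    cases fuel with
    | zero => simp at hf
    | succ n =>
      simp only [PySem.Chars.replace.go]
      by_cases h : c = v
      · subst h
        simp only [List.isPrefixOf, Bool.and_true, beq_self_eq_true, if_pos]
        have hd : List.drop [c].length (c :: t) = t := rfl
        rw [hd, (by simp : ([] : List Char).reverse ++ acc = acc),
          ih n acc (by simpa using Nat.succ_le_succ_iff.mp hf)]
        simp
      · have : ([v].isPrefixOf (c :: t)) = false := by
          simp [List.isPrefixOf]; exact fun hh => absurd hh.symm h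
        rw [if_neg (by simp [this])]
        rw [ih n (c :: acc) (by simpa using Nat.succ_le_succ_iff.mp hf)]
        simp [h]

theorem replace_single (v : Char) (l : List Char) :
    PySem.Chars.replace l [v] [] = l.filter (fun c => c ≠ v) := by
  unfold PySem.Chars.replace
  simp only [List.isEmpty_cons, Bool.false_eq_true, if_false]
  simpa using replace_go_single v l l.length [] le_rfl

-- the fold of five single-vowel replaces is the vowel filter
theorem fold_replace_eq (vs : List Char) : ∀ (l : List Char),
    vs.foldl (fun s v => PySem.Str.replace s (String.ofList [v]) "") (String.ofList l) =
      String.ofList (l.filter (fun c => ¬ (c ∈ vs))) := by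
  induction vs with
  | nil => intro l; simp
  | cons v vt ih =>
    intro l
    simp only [List.foldl_cons]
    have h1 : PySem.Str.replace (String.ofList l) (String.ofList [v]) "" =
        String.ofList (l.filter (fun c => c ≠ v)) := by
      unfold PySem.Str.replace
      have : (String.ofList l).toList = l := by simp
      rw [this]
      have hm : (String.ofList [v]).toList = [v] := by simp
      rw [hm]
      have he : ("" : String).toList = [] := rfl
      rw [he, replace_single]
    rw [h1, ih]
    congr 1
    rw [List.filter_filter]
    apply List.filter_congr
    intro c _
    by_cases hcv : c = v <;> by_cases hcm : c ∈ vt <;> simp [hcv, hcm]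

-- find.go with a single-character pattern: first index of that character, as a takeWhile length
theorem find_go_x (l : List Char) : ∀ (k : Nat),
    PySem.Chars.find.go ['x'] l k =
      if 'x' ∈ l then ((k : Int) + ((l.takeWhile (fun c => c ≠ 'x')).length : Int)) else -1 := by
  induction l with
  | nil => intro k; simp [PySem.Chars.find.go]
  | cons c t ih =>
    intro k
    by_cases h : c = 'x'
    · subst h
      simp [PySem.Chars.find.go, List.isPrefixOf, List.takeWhile]
    · have hpre : (['x'].isPrefixOf (c :: t)) = false := by
        simp [List.isPrefixOf]; exact fun hh => absurd hh.symm h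
      simp only [PySem.Chars.find.go, hpre, Bool.false_eq_true, if_false]
      rw [ih (k + 1)]
      by_cases hm : 'x' ∈ t
      · simp [hm, h, List.takeWhile, List.mem_cons]
        ring
      · have : ¬ ('x' ∈ c :: t) := by simp [hm]; exact fun hh => absurd hh.symm h
        simp [hm, this]

-- take of the takeWhile length is the takeWhile
theorem take_takeWhile_len (p : Char → Bool) (l : List Char) :
    l.take (l.takeWhile p).length = l.takeWhile p := by
  induction l with
  | nil => simp
  | cons c t ih =>
    by_cases h : p c = true <;> simp [List.takeWhile, h, ih]

-- ===== VERDICT (by name: the statement is the Claim_ definition above) =====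
theorem eraseVowels_spec : Claim_equal_eraseVowels := by
  intro input _
  unfold Spec_eraseVowels eraseVowels eraseVowels_alt
  rw [eraseVowelsLoop_eq input.toList ""]
  simp only [String.empty_append]
  by_cases hx : 'x' ∈ input.toList
  · -- e ≠ -1: the slice is the takeWhile prefix
    have he : PySem.Str.find input "x" =
        ((input.toList.takeWhile (fun c => c ≠ 'x')).length : Int) := by
      have : ("x" : String).toList = ['x'] := rfl
      unfold PySem.Str.find
      rw [this]
      unfold PySem.Chars.find
      rw [find_go_x input.toList 0, if_pos hx]
      simp
    rw [he]
    have hne : (((input.toList.takeWhile (fun c => c ≠ 'x')).length : Int)) ≠ -1 := by omega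
    rw [if_neg hne]
    have hslice : PySem.Str.slice input none
        (some ((input.toList.takeWhile (fun c => c ≠ 'x')).length : Int)) =
        String.ofList (input.toList.takeWhile (fun c => c ≠ 'x')) := by
      unfold PySem.Str.slice
      rw [PySem.Chars.slice_eq_listSlice, PySem.List.slice_to_natCast,
        take_takeWhile_len]
    rw [hslice, fold_replace_eq]
    simp
  · -- no 'x': the whole string is kept
    have he : PySem.Str.find input "x" = -1 := by
      have : ("x" : String).toList = ['x'] := rfl
      unfold PySem.Str.find
      rw [this]
      unfold PySem.Chars.find
      rw [find_go_x input.toList 0, if_neg hx]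
    rw [he, if_pos rfl]
    have htw : input.toList.takeWhile (fun c => c ≠ 'x') = input.toList :=
      List.takeWhile_eq_self_iff.mpr (by intro c hc; simp; exact fun h => hx (h ▸ hc))
    rw [htw]
    have hi : input = String.ofList input.toList := by simp
    conv_rhs => rw [hi]
    rw [fold_replace_eq]
    simp
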